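-- pv_equiv track=rewrite | github.com/samuelcorradi/servicepy | src/servicepy/__init__.py | __get_columns_size
-- ===== SOURCE A (Python) =====
-- def __get_columns_size(data:list)->dict:
--     """
--     Recebe um conjunto de dados
--     e retorna um dicionario
--     com o nome das colunas e
--     o tamanho de cada uma delas.
--     """
--     sizes = {}
--     for row in data:
--         if type(row) is dict:
--             for k, v in row.items():
--                 l = len(v)
--                 s = sizes.get(k, 0)
--                 sizes[k] = s if l<s else l
--         else:
--             raise Exception("O metodo para encontrar o tamanho dos campos funciona apenas com uma lista de dicionarios.")
--     return sizes
-- ===== SOURCE B (Python) =====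
-- def __get_columns_size(data: list) -> dict:
--     """Column-major re-implementation: validate rows, collect the distinct
--     column names in encounter order, then compute each column's max field
--     length by a per-column scan over all cells."""
--     for row in data:
--         if type(row) is not dict:
--             raise Exception("O metodo para encontrar o tamanho dos campos funciona apenas com uma lista de dicionarios.")
--     keys = []
--     for row in data:
--         for k in row:
--             if k not in keys:
--                 keys.append(k)
--     sizes = {}
--     for k in keys:
--         m = 0
--         for row in data:
--             for k2, v in row.items():
--                 if k2 == k and len(v) > m:
--                     m = len(v)
--         sizes[k] = m
--     return sizes
-- ===== Notes on version B (the rewrite author's own statement) =====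
-- stated objective: alternative
-- what changed: Replaces A's single row-major pass with incremental dict updates by a validate-then-column-major scheme: first collect the distinct column names in encounter order, then compute each column's maximum field length with a dedicated running-max scan over all rows.
import Mathlib
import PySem

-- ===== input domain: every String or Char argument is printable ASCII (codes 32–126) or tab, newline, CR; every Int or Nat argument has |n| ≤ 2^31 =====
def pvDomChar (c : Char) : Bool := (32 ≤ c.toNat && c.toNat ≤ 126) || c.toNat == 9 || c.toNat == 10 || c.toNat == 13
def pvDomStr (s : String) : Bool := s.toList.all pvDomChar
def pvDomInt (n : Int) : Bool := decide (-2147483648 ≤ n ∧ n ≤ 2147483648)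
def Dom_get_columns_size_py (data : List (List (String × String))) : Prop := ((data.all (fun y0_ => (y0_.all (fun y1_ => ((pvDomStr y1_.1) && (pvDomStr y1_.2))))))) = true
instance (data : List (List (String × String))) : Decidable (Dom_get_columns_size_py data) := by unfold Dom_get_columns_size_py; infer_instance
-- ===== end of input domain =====

-- B replaces A's single row-major pass with a validate-then-column-major scheme
-- (collect distinct column names, then one running-max scan per column); objective: alternative.


-- ===== PORT A =====
-- loop body of A's inner 'for k, v in row.items()': l = len(v); s = sizes.get(k, 0); sizes[k] = s if l<s else l
def pvAstep (sizes : PySem.Dict String Int) (kv : String × String) : PySem.Dict String Int :=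
  let l : Int := PySem.Str.len kv.2
  let s : Int := sizes.getD kv.1 0
  sizes.insert kv.1 (if l < s then s else l)

-- 'type(row) is dict' is always true under the type convention (rows ARE dicts), so the else/raise branch is unreachable
def get_columns_size_py (data : List (List (String × String))) : List (String × Int) :=
  (data.foldl (fun sizes row => row.foldl pvAstep sizes) PySem.Dict.empty).items

-- ===== PORT B =====
-- B's key-collection loop body: 'if k not in keys: keys.append(k)'
def pvKstep (ks : List String) (kv : String × String) : List String :=
  if ks.contains kv.1 then ks else ks ++ [kv.1]

-- B's per-column running-max loop body: 'if k2 == k and len(v) > m: m = len(v)'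
def pvMstep (k : String) (m : Int) (kv : String × String) : Int :=
  if kv.1 == k && PySem.Str.len kv.2 > m then PySem.Str.len kv.2 else m

def pvColKeys (data : List (List (String × String))) : List String :=
  data.foldl (fun ks row => row.foldl pvKstep ks) []

def pvColMax (data : List (List (String × String))) (k : String) : Int :=
  data.foldl (fun m row => row.foldl (pvMstep k) m) 0

def get_columns_size_py_alt (data : List (List (String × String))) : List (String × Int) :=
  ((pvColKeys data).foldl (fun sizes k => sizes.insert k (pvColMax data k)) PySem.Dict.empty).items

-- ===== PRECONDITION & SPEC =====
def Spec_get_columns_size_py (data : List (List (String × String))) (out : List (String × Int)) : Prop := out = get_columns_size_py_alt data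
instance (data : List (List (String × String))) (out : List (String × Int)) : Decidable (Spec_get_columns_size_py data out) := by unfold Spec_get_columns_size_py; infer_instance

-- ===== CLAIM (what is proved, stated in full; the proofs are below) =====
def Claim_equal_get_columns_size_py : Prop := ∀ (data : List (List (String × String))), Dom_get_columns_size_py data → Spec_get_columns_size_py data (get_columns_size_py data)

-- ===== LEMMAS AND PROOFS =====

-- a nested row/cell loop is the flat loop over all cells
lemma pv_foldl_nested {α γ : Type} (f : γ → α → γ) (data : List (List α)) (init : γ) :
    data.foldl (fun acc row => row.foldl f acc) init = (data.flatMap id).foldl f init := by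
  induction data generalizing init with
  | nil => rfl
  | cons r rs ih => simp [List.foldl_append, ih]

lemma pv_mstep_skip (k : String) (ps : List (String × String)) (m : Int)
    (h : ∀ kv ∈ ps, kv.1 ≠ k) : ps.foldl (pvMstep k) m = m := by
  induction ps generalizing m with
  | nil => rfl
  | cons p ps ih =>
    have hp : (p.1 == k) = false := by simp [h p (by simp)]
    simp only [List.foldl_cons, pvMstep, hp, Bool.false_and, Bool.false_eq_true, if_false]
    exact ih m (fun kv hm => h kv (by simp [hm]))

lemma pv_main (ps : List (String × String)) :
    (ps.foldl pvAstep PySem.Dict.empty).items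
        = (ps.foldl pvKstep []).map (fun k => (k, ps.foldl (pvMstep k) 0))
      ∧ (ps.foldl pvKstep []).Nodup
      ∧ ∀ kv ∈ ps, kv.1 ∈ ps.foldl pvKstep [] := by
  induction ps using List.reverseRecOn with
  | nil => refine ⟨rfl, by simp, by simp⟩
  | append_singleton ps p ih =>
    obtain ⟨hitems, hnd, hmem⟩ := ih
    set d := ps.foldl pvAstep PySem.Dict.empty with hd
    set K := ps.foldl pvKstep [] with hK
    have hkeys : d.keys = K := by
      simp [PySem.Dict.keys, hitems, List.map_map, Function.comp_def]
    have hdnd : d.keys.Nodup := by rw [hkeys]; exact hnd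
    simp only [List.foldl_append, List.foldl_cons, List.foldl_nil]
    by_cases hin : p.1 ∈ K
    · have hc : d.contains p.1 = true := (PySem.Dict.contains_iff_mem_keys d p.1).2 (hkeys ▸ hin)
      have hKs : pvKstep K p = K := by
        simp [pvKstep, List.contains_iff_mem, hin]
      have hgetD : d.getD p.1 0 = ps.foldl (pvMstep p.1) 0 := by
        have : (p.1, ps.foldl (pvMstep p.1) 0) ∈ d.items := by
          rw [hitems]; exact List.mem_map_of_mem hin
        exact PySem.Dict.getD_of_mem_items d this hdnd 0
      refine ⟨?_, hKs ▸ hnd, ?_⟩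
      · show (pvAstep d p).items = _
        simp only [pvAstep, hgetD]
        rw [PySem.Dict.items_insert_of_contains d _ hc, hitems, List.map_map, hKs]
        refine List.map_congr_left (fun k hkK => ?_)
        by_cases hkp : k = p.1
        · subst hkp
          simp only [Function.comp_def, beq_self_eq_true, pvMstep,
            Bool.true_and, Prod.mk.injEq, true_and]
          split_ifs with h1 h2 <;> simp_all <;> omega
        · have h1 : (k == p.1) = false := by simp [hkp]
          have h2 : (p.1 == k) = false := by simp [Ne.symm hkp]
          simp only [Function.comp_def, pvMstep, h1, h2, Bool.false_and,
            Bool.false_eq_true, if_false]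
      · intro kv hkv
        rw [hKs]
        rcases List.mem_append.1 hkv with h | h
        · exact hmem kv h
        · simp only [List.mem_singleton] at h; subst h; exact hin
    · have hc : d.contains p.1 = false := by
        by_contra h
        exact hin (hkeys ▸ (PySem.Dict.contains_iff_mem_keys d p.1).1 (by simpa using h))
      have hKs : pvKstep K p = K ++ [p.1] := by
        simp [pvKstep, List.contains_iff_mem, hin]
      have hnomatch : ∀ kv ∈ ps, kv.1 ≠ p.1 := fun kv hkv he => hin (he ▸ hmem kv hkv)
      have hM0 : ps.foldl (pvMstep p.1) 0 = 0 := pv_mstep_skip p.1 ps 0 hnomatch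
      refine ⟨?_, ?_, ?_⟩
      · show (pvAstep d p).items = _
        simp only [pvAstep, PySem.Dict.getD_of_not_contains d 0 hc]
        rw [PySem.Dict.items_insert_of_not_contains d _ hc, hitems, hKs, List.map_append]
        congr 1
        · refine List.map_congr_left (fun k hkK => ?_)
          have h2 : (p.1 == k) = false := by
            simp only [beq_eq_false_iff_ne, ne_eq]
            exact fun he => hin (he ▸ hkK)
          simp [pvMstep, h2]
        · have hl : (0:Int) ≤ PySem.Str.len p.2 := by
            rw [PySem.Str.len_eq]; positivity
          simp only [List.map_cons, List.map_nil, pvMstep, hM0, beq_self_eq_true, Bool.true_and]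
          split_ifs with h1 h2 <;> simp_all <;> omega
      · rw [hKs]; simp [List.Nodup.append, hnd, hin]
      · intro kv hkv
        rw [hKs]
        rcases List.mem_append.1 hkv with h | h
        · exact List.mem_append_left _ (hmem kv h)
        · simp only [List.mem_singleton] at h; subst h; simp

-- ===== VERDICT (by name: the statement is the Claim_ definition above) =====
theorem get_columns_size_py_spec : Claim_equal_get_columns_size_py := by
  intro data _
  obtain ⟨hitems, hnd, -⟩ := pv_main (data.flatMap id)
  show get_columns_size_py data = get_columns_size_py_alt data
  have hA : get_columns_size_py data = ((data.flatMap id).foldl pvAstep PySem.Dict.empty).items := by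
    unfold get_columns_size_py; rw [pv_foldl_nested]
  have hKeq : pvColKeys data = (data.flatMap id).foldl pvKstep [] := by
    unfold pvColKeys; rw [pv_foldl_nested]
  have hMeq : ∀ k, pvColMax data k = (data.flatMap id).foldl (pvMstep k) 0 := by
    intro k; unfold pvColMax; rw [pv_foldl_nested]
  have hB : get_columns_size_py_alt data
      = (pvColKeys data).map (fun k => (k, pvColMax data k)) := by
    have hfresh := PySem.Dict.items_foldl_insert_fresh (pvColKeys data) (fun k => k)
      (fun k => pvColMax data k) PySem.Dict.empty (fun a _ => rfl) (by simpa [hKeq] using hnd)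
    unfold get_columns_size_py_alt
    simpa using hfresh
  rw [hA, hB, hitems, hKeq]
  exact List.map_congr_left (fun k _ => by rw [hMeq])
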